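-- pv_equiv track=rewrite | github.com/MarceloHeredia/College | load_distribuition/genetic_manual.py | fitness_individual
-- ===== SOURCE A (Python) =====
-- loads = [27, 7, 6, 5, 4, 6, 10, 9, 8, 7, 6, 5, 4, 3, 2, 1, 27, 7, 6, 5, 4, 6, 10, 9, 8, 7, 6, 5, 4, 3, 2, 1]
--
-- def fitness_individual(individual):
--     i0 = 0
--     i1 = 0
--     for i, v in enumerate(individual):
--         if v == 0:
--             i0 += loads[i]
--         else:
--             i1 += loads[i]
--     return abs(i0 - i1)
-- ===== SOURCE B (Python) =====
-- loads = [27, 7, 6, 5, 4, 6, 10, 9, 8, 7, 6, 5, 4, 3, 2, 1, 27, 7, 6, 5, 4, 6, 10, 9, 8, 7, 6, 5, 4, 3, 2, 1]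
--
-- def fitness_individual(individual):
--     # Recursively compute the SIGNED load difference (bucket0 minus bucket1)
--     # in one quantity, instead of maintaining two bucket sums; abs at the end.
--     def signed(xs, i):
--         if not xs:
--             return 0
--         w = loads[i]
--         return (w if xs[0] == 0 else -w) + signed(xs[1:], i + 1)
--     return abs(signed(individual, 0))
-- ===== Notes on version B (the rewrite author's own statement) =====
-- stated objective: alternative
-- what changed: Replaces A's iterative two-accumulator bucket loop by a structural recursion that carries a single signed difference (+load for 0-bits, -load otherwise) and takes abs once at the end.
import Mathlib
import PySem

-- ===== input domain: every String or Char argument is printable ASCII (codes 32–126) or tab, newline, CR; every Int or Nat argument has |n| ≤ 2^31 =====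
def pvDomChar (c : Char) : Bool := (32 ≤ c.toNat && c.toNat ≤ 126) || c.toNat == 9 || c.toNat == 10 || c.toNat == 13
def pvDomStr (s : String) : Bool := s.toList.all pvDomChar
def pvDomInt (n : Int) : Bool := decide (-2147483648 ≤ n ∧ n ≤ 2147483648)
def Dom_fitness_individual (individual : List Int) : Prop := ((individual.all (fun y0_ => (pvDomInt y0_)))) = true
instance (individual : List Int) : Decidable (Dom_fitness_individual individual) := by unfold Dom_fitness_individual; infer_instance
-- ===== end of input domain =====

-- B replaces A's iterative two-accumulator bucket loop by a structural recursion carrying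
-- one signed difference (+load for 0-bits, -load otherwise), with abs taken once at the end.

-- ===== PORT A =====
def pvLoads : List Int :=
  [27, 7, 6, 5, 4, 6, 10, 9, 8, 7, 6, 5, 4, 3, 2, 1,
   27, 7, 6, 5, 4, 6, 10, 9, 8, 7, 6, 5, 4, 3, 2, 1]

-- A: two accumulators (i0, i1), one pass over enumerate(individual).
-- loads[i] is in range on Pre_; pyGetD's default is never used there.
def fitness_individual (individual : List Int) : Int :=
  let p := (PySem.List.enumerate individual 0).foldl
    (fun (s : Int × Int) (iv : Int × Int) =>
      if iv.2 = 0 then (s.1 + PySem.List.pyGetD pvLoads iv.1 0, s.2)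
      else (s.1, s.2 + PySem.List.pyGetD pvLoads iv.1 0)) (0, 0)
  |p.1 - p.2|

-- ===== PORT B =====
-- B's recursive helper signed(xs, i): structural recursion on the list.
def pvSigned : List Int → Int → Int
  | [], _ => 0
  | x :: xs, i =>
      (if x = 0 then PySem.List.pyGetD pvLoads i 0 else -(PySem.List.pyGetD pvLoads i 0))
        + pvSigned xs (i + 1)

def fitness_individual_alt (individual : List Int) : Int :=
  |pvSigned individual 0|

-- ===== PRECONDITION & SPEC =====
-- A indexes loads[i] for every position of individual; loads has 32 entries, so both
-- programs raise IndexError when individual is longer than 32.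
def Pre_fitness_individual (individual : List Int) : Prop := individual.length ≤ 32
instance (individual : List Int) : Decidable (Pre_fitness_individual individual) := by
  unfold Pre_fitness_individual; infer_instance

def pvWitness_fitness_individual : List Int := [0, 1, 0, 5, 0]

def Spec_fitness_individual (individual : List Int) (out : Int) : Prop := out = fitness_individual_alt individual
instance (individual : List Int) (out : Int) : Decidable (Spec_fitness_individual individual out) := by unfold Spec_fitness_individual; infer_instance

-- ===== CLAIM (what is proved, stated in full; the proofs are below) =====
def Claim_equal_fitness_individual : Prop := ∀ (individual : List Int), Dom_fitness_individual individual → Pre_fitness_individual individual → Spec_fitness_individual individual (fitness_individual individual)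

-- ===== LEMMAS AND PROOFS =====

-- Invariant of A's fold: first minus second accumulator advances by B's signed sum.
theorem pvFoldA_diff (l : List Int) : ∀ (s a b : Int),
    ((PySem.List.enumerate l s).foldl
      (fun (p : Int × Int) (iv : Int × Int) =>
        if iv.2 = 0 then (p.1 + PySem.List.pyGetD pvLoads iv.1 0, p.2)
        else (p.1, p.2 + PySem.List.pyGetD pvLoads iv.1 0)) (a, b)).1
    - ((PySem.List.enumerate l s).foldl
      (fun (p : Int × Int) (iv : Int × Int) =>
        if iv.2 = 0 then (p.1 + PySem.List.pyGetD pvLoads iv.1 0, p.2)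
        else (p.1, p.2 + PySem.List.pyGetD pvLoads iv.1 0)) (a, b)).2
    = (a - b) + pvSigned l s := by
  induction l with
  | nil => intro s a b; simp [PySem.List.enumerate_nil, pvSigned]
  | cons x xs ih =>
    intro s a b
    simp only [PySem.List.enumerate_cons, List.foldl_cons, pvSigned]
    by_cases hx : x = 0 <;> simp [hx, ih] <;> ring

-- ===== VERDICT (by name: the statement is the Claim_ definition above) =====
theorem fitness_individual_spec : Claim_equal_fitness_individual := by
  intro individual _ _
  unfold Spec_fitness_individual fitness_individual fitness_individual_alt
  have h := pvFoldA_diff individual 0 0 0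
  simp only [sub_zero, zero_add] at h
  exact congrArg (fun z : Int => |z|) h
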